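-- pv_equiv track=rewrite | github.com/calebgp/topas | exercises-2023/d.py | winners
-- ===== SOURCE A (Python) =====
-- def calcPoints(deck):
--     points = 0
--     counted_cards = set()
--     for card in deck:
--         if deck.count(card) >= 4 and card not in counted_cards:
--             points += 10 * card
--             counted_cards.add(card)
--         elif deck.count(card) == 3 and card not in counted_cards:
--             points += 5 * card
--             counted_cards.add(card)
--         elif deck.count(card) == 2 and card not in counted_cards:
--             points += 3 * card
--             counted_cards.add(card)
--         elif card not in counted_cards:
--             points += card
--     return points
--
-- def winners(players):
--     max_points = 0
--     winners = 0
--     for deck in players: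
--         points = calcPoints(deck)
--         if points > max_points:
--             max_points = points
--             winners += 1
--         elif points == max_points:
--             winners += 1
--     return winners, max_points
-- ===== SOURCE B (Python) =====
-- def calcPoints(deck):
--     counts = {}
--     for card in deck:
--         counts[card] = counts.get(card, 0) + 1
--     points = 0
--     for card, n in counts.items():
--         if n >= 4:
--             points += 10 * card
--         elif n == 3:
--             points += 5 * card
--         elif n == 2:
--             points += 3 * card
--         else:
--             points += card
--     return points
--
-- def winners(players):
--     max_points = 0
--     count = 0
--     for deck in players:
--         points = calcPoints(deck)
--         if points >= max_points:
--             count += 1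
--             max_points = max(max_points, points)
--     return count, max_points
-- ===== Notes on version B (the rewrite author's own statement) =====
-- stated objective: faster
-- what changed: calcPoints is rewritten to build a frequency dict in one pass and sum multiplier*card over its items, replacing A's per-card deck.count rescans and counted_cards set; the winners loop is folded into a single points >= max_points test with max().
import Mathlib
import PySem

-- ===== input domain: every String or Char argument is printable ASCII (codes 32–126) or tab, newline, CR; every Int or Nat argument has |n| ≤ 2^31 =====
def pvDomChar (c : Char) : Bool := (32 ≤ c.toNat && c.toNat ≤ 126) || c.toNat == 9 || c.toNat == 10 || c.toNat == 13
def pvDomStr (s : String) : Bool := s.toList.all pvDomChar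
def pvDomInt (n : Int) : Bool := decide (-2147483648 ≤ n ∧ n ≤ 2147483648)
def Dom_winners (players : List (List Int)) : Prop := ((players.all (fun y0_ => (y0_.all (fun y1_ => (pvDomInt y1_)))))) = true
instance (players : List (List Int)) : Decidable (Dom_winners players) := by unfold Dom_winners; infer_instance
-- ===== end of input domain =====

-- B replaces A's per-card deck.count rescans and "counted" set by a frequency dict
-- built in one pass and summed over once (objective: faster, O(n^2) -> O(n)).

-- ===== PORT A =====
-- A's calcPoints: loop over the deck, rescanning deck.count(card) and a counted_cards set.
def calcPointsA (deck : List Int) : Int :=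
  (deck.foldl (fun (st : Int × PySem.Set Int) card =>
    if 4 ≤ deck.count card ∧ PySem.Set.contains st.2 card = false then
      (st.1 + 10 * card, PySem.Set.add st.2 card)
    else if deck.count card = 3 ∧ PySem.Set.contains st.2 card = false then
      (st.1 + 5 * card, PySem.Set.add st.2 card)
    else if deck.count card = 2 ∧ PySem.Set.contains st.2 card = false then
      (st.1 + 3 * card, PySem.Set.add st.2 card)
    else if PySem.Set.contains st.2 card = false then
      (st.1 + card, st.2)
    else st) (0, PySem.Set.empty)).1

def winners (players : List (List Int)) : List Int :=
  -- state = (max_points, winners); Python returns the tuple (winners, max_points)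
  let st := players.foldl (fun (st : Int × Int) deck =>
    let points := calcPointsA deck
    if points > st.1 then (points, st.2 + 1)
    else if points = st.1 then (st.1, st.2 + 1)
    else st) (0, 0)
  [st.2, st.1]

-- ===== PORT B =====
-- B's calcPoints: build the frequency dict in one pass, then sum over its items.
def calcPointsB (deck : List Int) : Int :=
  let counts := deck.foldl (fun (d : PySem.Dict Int Int) card =>
    d.insert card (d.getD card 0 + 1)) PySem.Dict.empty
  counts.items.foldl (fun points p =>
    if 4 ≤ p.2 then points + 10 * p.1
    else if p.2 = 3 then points + 5 * p.1
    else if p.2 = 2 then points + 3 * p.1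
    else points + p.1) 0

def winners_alt (players : List (List Int)) : List Int :=
  let st := players.foldl (fun (st : Int × Int) deck =>
    let points := calcPointsB deck
    if points ≥ st.1 then (max st.1 points, st.2 + 1) else st) (0, 0)
  [st.2, st.1]

-- ===== PRECONDITION & SPEC =====
def Spec_winners (players : List (List Int)) (out : List Int) : Prop := out = winners_alt players
instance (players : List (List Int)) (out : List Int) : Decidable (Spec_winners players out) := by unfold Spec_winners; infer_instance

-- ===== CLAIM (what is proved, stated in full; the proofs are below) =====
def Claim_equal_winners : Prop := ∀ (players : List (List Int)), Dom_winners players → Spec_winners players (winners players)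

-- ===== LEMMAS AND PROOFS =====

-- the per-distinct-card score: multiplier by frequency in the deck, times the card
def cardScore (deck : List Int) (c : Int) : Int :=
  (if 4 ≤ deck.count c then 10
   else if deck.count c = 3 then 5
   else if deck.count c = 2 then 3 else 1) * c

-- the fresh elements Set.update S r appends after S, in first-occurrence order
def newElems (S : PySem.Set Int) : List Int → List Int
  | [] => []
  | c :: r => if PySem.Set.contains S c then newElems S r else c :: newElems (S ++ [c]) r

theorem newElems_congr (r : List Int) (S T : PySem.Set Int)
    (h : ∀ x ∈ r, (PySem.Set.contains S x = PySem.Set.contains T x)) :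
    newElems S r = newElems T r := by
  induction r generalizing S T with
  | nil => rfl
  | cons c r ih =>
    have hc := h c (by simp)
    have hrec : newElems (S ++ [c]) r = newElems (T ++ [c]) r := by
      apply ih
      intro x hx
      by_cases hxc : x = c
      · subst hxc; simp [PySem.Set.contains]
      · have hx2 := h x (List.mem_cons_of_mem _ hx)
        simp [PySem.Set.contains, hxc] at hx2 ⊢
        exact hx2
    simp only [newElems, hc, hrec, ih S T (fun x hx => h x (List.mem_cons_of_mem _ hx))]

theorem newElems_append_of_not_mem (r : List Int) (S : PySem.Set Int) (c : Int) (hc : c ∉ r) :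
    newElems (S ++ [c]) r = newElems S r := by
  apply newElems_congr
  intro x hx
  have : x ≠ c := fun h => hc (h ▸ hx)
  simp [PySem.Set.contains, this]

-- A's loop, started at any suffix `rest` of the deck and any state, adds exactly the
-- scores of the cards of `rest` that are new to the counted set
theorem update_eq_append_newElems (r : List Int) (S : PySem.Set Int) :
    PySem.Set.update S r = S ++ newElems S r := by
  induction r generalizing S with
  | nil => simp [PySem.Set.update, newElems]
  | cons c r ih =>
    have hstep : PySem.Set.update S (c :: r) = PySem.Set.update (PySem.Set.add S c) r := rfl
    by_cases hc : PySem.Set.contains S c = true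
    · have hm : c ∈ S := by simpa [PySem.Set.contains] using hc
      have : PySem.Set.add S c = S := by simp [PySem.Set.add, hm]
      rw [hstep, this, ih]
      simp [newElems, hm]
    · have hm : c ∉ S := by simpa [PySem.Set.contains] using hc
      have hadd : PySem.Set.add S c = S ++ [c] := by simp [PySem.Set.add, hm]
      rw [hstep, hadd, ih]
      simp [newElems, hm]

-- A's loop, started at any suffix `rest` of the deck and any state, adds exactly the
-- scores of the cards of `rest` that are new to the counted set
theorem calcA_loop (deck : List Int) (rest : List Int) (points : Int) (S : PySem.Set Int)
    (hcnt : ∀ c, rest.count c ≤ deck.count c) :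
    (rest.foldl (fun (st : Int × PySem.Set Int) card =>
      if 4 ≤ deck.count card ∧ PySem.Set.contains st.2 card = false then
        (st.1 + 10 * card, PySem.Set.add st.2 card)
      else if deck.count card = 3 ∧ PySem.Set.contains st.2 card = false then
        (st.1 + 5 * card, PySem.Set.add st.2 card)
      else if deck.count card = 2 ∧ PySem.Set.contains st.2 card = false then
        (st.1 + 3 * card, PySem.Set.add st.2 card)
      else if PySem.Set.contains st.2 card = false then
        (st.1 + card, st.2)
      else st) (points, S)).1
    = points + ((newElems S rest).map (cardScore deck)).sum := by
  induction rest generalizing points S with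
  | nil => simp [newElems]
  | cons card rest ih =>
    have hcnt' : ∀ c, rest.count c ≤ deck.count c := by
      intro c
      have := hcnt c
      by_cases hec : c = card <;> simp [List.count_cons, hec] at this ⊢ <;> omega
    rw [List.foldl_cons]
    by_cases hS : PySem.Set.contains S card = true
    · -- already counted: every branch's guard fails, state unchanged
      simp only [hS]
      rw [if_neg (by simp [hS]), if_neg (by simp [hS]), if_neg (by simp [hS]),
          if_neg (by simp [hS])]
      have hm : card ∈ S := by simpa [PySem.Set.contains] using hS
      rw [ih points S hcnt']
      simp [newElems, hm]
    · have hSf : PySem.Set.contains S card = false := by simp_all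
      have hm : card ∉ S := by simpa [PySem.Set.contains] using hSf
      have hadd : PySem.Set.add S card = S ++ [card] := by simp [PySem.Set.add, hm]
      have hne : newElems S (card :: rest) = card :: newElems (S ++ [card]) rest := by
        simp [newElems, hm]
      by_cases h4 : 4 ≤ deck.count card
      · rw [if_pos ⟨h4, hSf⟩, hadd, ih _ _ hcnt', hne]
        simp [cardScore, if_pos h4]
        ring
      · rw [if_neg (by tauto)]
        by_cases h3 : deck.count card = 3
        · rw [if_pos ⟨h3, hSf⟩, hadd, ih _ _ hcnt', hne]
          simp [cardScore, h3, if_neg h4]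
          ring
        · rw [if_neg (by tauto)]
          by_cases h2 : deck.count card = 2
          · rw [if_pos ⟨h2, hSf⟩, hadd, ih _ _ hcnt', hne]
            simp [cardScore, h2, if_neg h4]
            ring
          · rw [if_neg (by tauto), if_pos hSf, ih _ _ hcnt', hne]
            have hmem : card ∉ rest := by
              have hd := hcnt card
              simp [List.count_cons] at hd
              have : rest.count card = 0 := by omega
              exact List.count_eq_zero.mp this
            rw [newElems_append_of_not_mem _ _ _ hmem]
            simp [cardScore, if_neg h4, h3, h2]
            ring

theorem calcA_eq_sum (deck : List Int) :
    calcPointsA deck = ((PySem.Set.ofList deck).map (cardScore deck)).sum := by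
  have h := calcA_loop deck deck 0 PySem.Set.empty (fun c => le_refl _)
  have hof : PySem.Set.ofList deck = newElems PySem.Set.empty deck := by
    have := update_eq_append_newElems deck PySem.Set.empty
    simpa [PySem.Set.ofList, PySem.Set.update, PySem.Set.empty] using this
  rw [calcPointsA, h, hof]
  simp

theorem calcB_eq_sum (deck : List Int) :
    calcPointsB deck = ((PySem.Set.ofList deck).map (cardScore deck)).sum := by
  rw [calcPointsB]
  rw [PySem.Dict.foldl_insert_getD_add_one_eq_counter, PySem.Dict.items_counter]
  have hfold : ∀ (l : List (Int × Int)) (a : Int),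
      l.foldl (fun points p =>
        if 4 ≤ p.2 then points + 10 * p.1
        else if p.2 = 3 then points + 5 * p.1
        else if p.2 = 2 then points + 3 * p.1
        else points + p.1) a
      = a + (l.map (fun p : Int × Int =>
          (if 4 ≤ p.2 then 10 else if p.2 = 3 then 5 else if p.2 = 2 then 3 else 1) * p.1)).sum := by
    intro l
    induction l with
    | nil => simp
    | cons p l ih =>
      intro a
      rw [List.foldl_cons, List.map_cons, List.sum_cons]
      split_ifs <;> rw [ih] <;> ring
  rw [hfold, List.map_map]
  have hmap : ∀ k : Int, ((fun p : Int × Int =>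
      (if 4 ≤ p.2 then 10 else if p.2 = 3 then 5 else if p.2 = 2 then 3 else 1) * p.1) ∘
      (fun k => (k, (deck.count k : Int)))) k = cardScore deck k := by
    intro k
    simp only [Function.comp, cardScore]
    split_ifs <;> first | rfl | (exfalso; omega)
  rw [List.map_congr_left (fun k _ => hmap k)]
  simp

theorem calc_eq (deck : List Int) : calcPointsA deck = calcPointsB deck := by
  rw [calcA_eq_sum, calcB_eq_sum]

-- ===== VERDICT (by name: the statement is the Claim_ definition above) =====
theorem winners_spec : Claim_equal_winners := by
  intro players _
  unfold Spec_winners winners winners_alt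
  have hstep : (fun (st : Int × Int) deck =>
      let points := calcPointsA deck
      if points > st.1 then (points, st.2 + 1)
      else if points = st.1 then (st.1, st.2 + 1)
      else st)
    = (fun (st : Int × Int) deck =>
      let points := calcPointsB deck
      if points ≥ st.1 then (max st.1 points, st.2 + 1) else st) := by
    funext st deck
    rw [← calc_eq]
    simp only []
    rcases lt_trichotomy (calcPointsA deck) st.1 with h | h | h
    · simp [not_lt.mpr (le_of_lt h), ne_of_lt h, not_le.mpr h]
    · simp [h]
    · simp [h, le_of_lt h, max_eq_right (le_of_lt h)]
  rw [hstep]
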